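-- pv_equiv track=rewrite | github.com/m1ke782/Mathematical-Investigations-in-Python-1 | task.py | greedy_lane_overflow
-- ===== SOURCE A (Python) =====
-- def greedy_lane_overflow(no_lanes, capacity, cars) :
--     """
--     Returns the overflow after using the greedy lane algorithm.
--
--     Inputs :
--     - num_lanes | int       : the number of lanes
--     - capacity | int        : the maximum capacity of each lane
--     - cars| int[]           : the list of car lengths
--
--     Returns :
--         int     : the total length of cars in the overflow carpark.
--     """
--     # keep track of which cars are left
--     cars_left = cars.copy()
--     cars_left.sort(reverse=True)
--
--     # for each lane...
--     for i in range(no_lanes) :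
--         # keep track of the size of this lane, and which car we are considering
--         lane_sum = 0
--         j = 0
--
--         # for each car left...
--         while j < len(cars_left) :
--             # if this car fits, add it to the lane and remove it from the car
--             if lane_sum + cars_left[j] <= capacity :
--                 lane_sum += cars_left[j]
--                 del cars_left[j]
--             else :
--                 j += 1
--
--     # return the sum of the lengths of all the remaining cars
--     return sum(cars_left)
-- ===== SOURCE B (Python) =====
-- def _rle(xs):
--     """Run-length encode xs into [(value, count), ...]."""
--     runs = []
--     i = 0
--     n = len(xs)
--     while i < n:
--         v = xs[i]
--         k = i + 1
--         while k < n and xs[k] == v: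
--             k += 1
--         runs.append((v, k - i))
--         i = k
--     return runs
--
--
-- def greedy_lane_overflow(no_lanes, capacity, cars):
--     """Same greedy packing, but over run-length-encoded car lengths:
--     a whole run of equal cars is placed in one arithmetic step (floor
--     division), and lane filling stops early once a pass places nothing."""
--     runs = _rle(sorted(cars, reverse=True))
--     lanes = no_lanes
--     while lanes > 0:
--         rem = capacity
--         new_runs = []
--         took = False
--         for v, k in runs:
--             if v <= rem:
--                 # copies of v fit while v <= rem - m*v; batch them
--                 t = min(k, rem // v) if v > 0 else k
--                 rem -= t * v
--                 took = True
--                 if k - t: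
--                     new_runs.append((v, k - t))
--             else:
--                 new_runs.append((v, k))
--         if not took:
--             break
--         runs = new_runs
--         lanes -= 1
--     return sum(v * k for v, k in runs)
-- ===== Notes on version B (the rewrite author's own statement) =====
-- stated objective: faster
-- what changed: B run-length-encodes the sorted car lengths and fills each lane over (value, count) runs, placing a whole run of equal cars in one floor-division step, and stops iterating lanes as soon as a pass places nothing; A rescans every remaining car for every lane.
import Mathlib
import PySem

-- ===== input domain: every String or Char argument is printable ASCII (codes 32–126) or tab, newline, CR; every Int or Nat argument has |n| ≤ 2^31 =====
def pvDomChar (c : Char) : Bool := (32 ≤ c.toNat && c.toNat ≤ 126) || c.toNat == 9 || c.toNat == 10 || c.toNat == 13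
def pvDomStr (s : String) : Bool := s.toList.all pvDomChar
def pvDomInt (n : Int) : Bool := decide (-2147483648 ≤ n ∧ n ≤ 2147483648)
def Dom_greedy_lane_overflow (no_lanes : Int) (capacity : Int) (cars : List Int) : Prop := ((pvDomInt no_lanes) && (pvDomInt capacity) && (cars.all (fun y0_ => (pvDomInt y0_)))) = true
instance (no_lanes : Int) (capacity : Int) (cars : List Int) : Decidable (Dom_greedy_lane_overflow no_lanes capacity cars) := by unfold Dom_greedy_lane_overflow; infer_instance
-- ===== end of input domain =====

-- B replaces A's per-lane rescans over individual cars by a pass over run-length-encoded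
-- (value, count) pairs, placing a whole run of equal cars in one floor-division step and
-- stopping early once a lane pass places nothing; return values agree on all inputs.

-- ===== PORT A =====
-- the inner `while j < len(cars_left)` loop of A (state: lane_sum, cars_left, j)
def pvLaneWhileA (capacity : Int) (lane_sum : Int) (cars_left : List Int) (j : Nat) : List Int :=
  if h : j < cars_left.length then
    if lane_sum + cars_left[j] ≤ capacity then
      pvLaneWhileA capacity (lane_sum + cars_left[j]) (cars_left.eraseIdx j) j
    else
      pvLaneWhileA capacity lane_sum cars_left (j + 1)
  else cars_left
termination_by cars_left.length - j
decreasing_by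
  · have := List.length_eraseIdx_of_lt h; omega
  · omega

def greedy_lane_overflow (no_lanes : Int) (capacity : Int) (cars : List Int) : Int :=
  let cars_left := PySem.List.sorted cars (fun x => x) true
  ((PySem.List.pyRange 0 no_lanes 1).foldl (fun cl _ => pvLaneWhileA capacity 0 cl 0) cars_left).sum

-- ===== PORT B =====
-- the inner `while k < len(xs) and xs[k] == v` counter of _rle
def pvRleCnt (xs : List Int) (v : Int) (k : Nat) : Nat :=
  if h : k < xs.length then
    if xs[k] = v then pvRleCnt xs v (k + 1) else k
  else k
termination_by xs.length - k

-- needed by pvRle's termination proof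
theorem pvRleCnt_ge (xs : List Int) (v : Int) (k : Nat) : k ≤ pvRleCnt xs v k := by
  fun_induction pvRleCnt <;> omega

-- _rle: outer `while i < n` loop (appends one (value, count) run per iteration)
def pvRleLoop (xs : List Int) (i : Nat) (runs : List (Int × Int)) : List (Int × Int) :=
  if h : i < xs.length then
    pvRleLoop xs (pvRleCnt xs xs[i] (i + 1))
      (runs ++ [(xs[i], ((pvRleCnt xs xs[i] (i + 1) : Int) - (i : Int)))])
  else runs
termination_by xs.length - i
decreasing_by
  have := pvRleCnt_ge xs xs[i] (i + 1)
  omega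

-- _rle itself
def pvRle (xs : List Int) : List (Int × Int) := pvRleLoop xs 0 []

-- the body of B's `for v, k in runs` loop; state (rem, new_runs, took)
def pvPassStep (st : Int × List (Int × Int) × Bool) (p : Int × Int) : Int × List (Int × Int) × Bool :=
  if p.1 ≤ st.1 then
    let t : Int := if 0 < p.1 then min p.2 (PySem.Int.floordiv st.1 p.1) else p.2
    (st.1 - t * p.1, if p.2 - t ≠ 0 then st.2.1 ++ [(p.1, p.2 - t)] else st.2.1, true)
  else (st.1, st.2.1 ++ [(p.1, p.2)], st.2.2)

-- B's `while lanes > 0` loop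
def pvLanesB (capacity : Int) (runs : List (Int × Int)) (lanes : Int) : List (Int × Int) :=
  if 0 < lanes then
    let r := runs.foldl pvPassStep (capacity, [], false)
    if r.2.2 then pvLanesB capacity r.2.1 (lanes - 1) else runs
  else runs
termination_by lanes.toNat
decreasing_by omega

def greedy_lane_overflow_alt (no_lanes : Int) (capacity : Int) (cars : List Int) : Int :=
  let runs := pvRle (PySem.List.sorted cars (fun x => x) true)
  ((pvLanesB capacity runs no_lanes).map (fun p => p.1 * p.2)).sum

-- ===== PRECONDITION & SPEC =====
def Spec_greedy_lane_overflow (no_lanes : Int) (capacity : Int) (cars : List Int) (out : Int) : Prop := out = greedy_lane_overflow_alt no_lanes capacity cars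
instance (no_lanes : Int) (capacity : Int) (cars : List Int) (out : Int) : Decidable (Spec_greedy_lane_overflow no_lanes capacity cars out) := by unfold Spec_greedy_lane_overflow; infer_instance

-- ===== CLAIM (what is proved, stated in full; the proofs are below) =====
def Claim_equal_greedy_lane_overflow : Prop := ∀ (no_lanes : Int) (capacity : Int) (cars : List Int), Dom_greedy_lane_overflow no_lanes capacity cars → Spec_greedy_lane_overflow no_lanes capacity cars (greedy_lane_overflow no_lanes capacity cars)

-- ===== LEMMAS AND PROOFS =====

-- one functional lane pass: scan left to right, take a car iff it fits the remaining room
def pvPass (rem : Int) : List Int → List Int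
  | [] => []
  | c :: cs => if c ≤ rem then pvPass (rem - c) cs else c :: pvPass rem cs

def pvFlat (runs : List (Int × Int)) : List Int :=
  runs.flatMap (fun p => List.replicate p.2.toNat p.1)

def pvOK (runs : List (Int × Int)) : Prop := ∀ p ∈ runs, 1 ≤ p.2

theorem pvFlat_nil : pvFlat [] = [] := rfl

theorem pvFlat_cons (p : Int × Int) (rs : List (Int × Int)) :
    pvFlat (p :: rs) = List.replicate p.2.toNat p.1 ++ pvFlat rs := rfl

theorem pvFlat_append (a b : List (Int × Int)) : pvFlat (a ++ b) = pvFlat a ++ pvFlat b := by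
  simp [pvFlat]

-- A's pointer-and-delete while loop is the functional pass on the suffix from j
theorem pvLaneWhileA_eq (capacity lane_sum : Int) (cars_left : List Int) (j : Nat) :
    pvLaneWhileA capacity lane_sum cars_left j =
      cars_left.take j ++ pvPass (capacity - lane_sum) (cars_left.drop j) := by
  fun_induction pvLaneWhileA with
  | case1 lane_sum l j h hfit ih =>
    rw [ih]
    have hdj : l.drop j = l[j] :: l.drop (j + 1) := List.drop_eq_getElem_cons h
    have he : l.eraseIdx j = l.take j ++ l.drop (j + 1) := List.eraseIdx_eq_take_drop_succ l j
    have htl : (l.take j).length = j := by simp; omega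
    rw [he, List.take_append_of_le_length (by omega), List.take_take,
        List.drop_append_of_le_length (by omega)]
    rw [List.drop_of_length_le (le_of_eq htl), min_self, hdj]
    simp only [List.nil_append, pvPass]
    rw [if_pos (by omega)]
    have harg : capacity - (lane_sum + l[j]) = capacity - lane_sum - l[j] := by ring
    rw [harg]
  | case2 lane_sum l j h hfit ih =>
    have hdj : l.drop j = l[j] :: l.drop (j + 1) := List.drop_eq_getElem_cons h
    have ht1 : l.take (j + 1) = l.take j ++ [l[j]] := by
      rw [List.take_add_one, List.getElem?_eq_getElem h]
      rfl
    rw [ih, ht1, hdj]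
    simp only [pvPass]
    rw [if_neg (by omega)]
    rw [List.append_assoc, List.singleton_append]
  | case3 lane_sum l j h =>
    rw [List.take_of_length_le (by omega), List.drop_of_length_le (by omega)]
    simp [pvPass]

-- folding a constant-argument function over a list is function iteration
theorem pvFoldl_const {α β : Type} (f : α → α) (l : List β) (s : α) :
    l.foldl (fun x _ => f x) s = f^[l.length] s := by
  induction l generalizing s with
  | nil => rfl
  | cons b bs ih => simp [List.foldl_cons, ih, Function.iterate_succ_apply]

-- a run none of whose copies fits is kept unchanged
theorem pvPass_rep_skip (rem v : Int) (h : ¬ v ≤ rem) (kn : Nat) (rest : List Int) :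
    pvPass rem (List.replicate kn v ++ rest) = List.replicate kn v ++ pvPass rem rest := by
  induction kn with
  | zero => simp
  | succ n ih => simp [List.replicate_succ, pvPass, if_neg h, ih]

-- a fitting run of nonpositive cars is taken whole
theorem pvPass_rep_nonpos (v : Int) (hv : v ≤ 0) (kn : Nat) :
    ∀ (rem : Int), v ≤ rem → ∀ (rest : List Int),
      pvPass rem (List.replicate kn v ++ rest) = pvPass (rem - (kn : Int) * v) rest := by
  induction kn with
  | zero => intro rem _ rest; simp
  | succ n ih =>
    intro rem hfit rest
    simp only [List.replicate_succ, List.cons_append, pvPass, if_pos hfit]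
    rw [ih (rem - v) (by omega) rest]
    congr 1
    push_cast
    ring

-- a fitting run of positive cars: exactly min(count, rem // v) copies are taken
theorem pvPass_rep_pos (v : Int) (hv : 0 < v) (kn : Nat) :
    ∀ (rem : Int), v ≤ rem → ∀ (rest : List Int),
      pvPass rem (List.replicate kn v ++ rest) =
        List.replicate (kn - (min (kn : Int) (PySem.Int.floordiv rem v)).toNat) v ++
          pvPass (rem - (min (kn : Int) (PySem.Int.floordiv rem v)) * v) rest := by
  induction kn with
  | zero =>
    intro rem hfit rest
    have hd : 1 ≤ PySem.Int.floordiv rem v := by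
      rw [PySem.Int.le_floordiv_iff_mul_le hv]; omega
    have : min ((0 : Nat) : Int) (PySem.Int.floordiv rem v) = 0 := by omega
    rw [this]; simp
  | succ n ih =>
    intro rem hfit rest
    have hd1 : 1 ≤ PySem.Int.floordiv rem v := by
      rw [PySem.Int.le_floordiv_iff_mul_le hv]; omega
    simp only [List.replicate_succ, List.cons_append, pvPass, if_pos hfit]
    by_cases h2 : v ≤ rem - v
    · -- at least one more copy fits after this one
      have hsub : PySem.Int.floordiv (rem - v) v = PySem.Int.floordiv rem v - 1 := by
        rw [PySem.Int.floordiv_eq_ediv_of_pos hv, PySem.Int.floordiv_eq_ediv_of_pos hv]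
        have : rem - v = rem + (-1) * v := by ring
        rw [this, Int.add_mul_ediv_right _ _ (by omega)]
        omega
      have hd2 : 2 ≤ PySem.Int.floordiv rem v := by
        rw [PySem.Int.le_floordiv_iff_mul_le hv]; omega
      rw [ih (rem - v) h2 rest, hsub]
      set d := PySem.Int.floordiv rem v with hdd
      have ht : min ((n : Int) + 1) d = min (n : Int) (d - 1) + 1 := by
        rcases le_total ((n : Int)) (d - 1) with hc | hc
        · rw [min_eq_left hc, min_eq_left (by omega)]
        · rw [min_eq_right hc, min_eq_right (by omega)]; omega
      push_cast
      rw [ht]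
      have hm0 : (0 : Int) ≤ min ((n : Int)) (d - 1) := le_min (by omega) (by omega)
      set m := min ((n : Int)) (d - 1) with hmm
      congr 1
      · congr 1
        omega
      · congr 1
        ring
    · -- this is the last copy that fits: rem // v = 1
      have hdlt : PySem.Int.floordiv rem v < 2 := by
        rw [PySem.Int.floordiv_lt_iff_lt_mul hv]; omega
      have hd : PySem.Int.floordiv rem v = 1 := by omega
      rw [pvPass_rep_skip (rem - v) v h2 n rest, hd]
      have hmin : min ((n : Int) + 1) 1 = 1 := min_eq_right (by omega)
      push_cast
      rw [hmin]
      simp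

-- the B pass (foldl of pvPassStep) computes the functional pass on the flattening
theorem pvFoldl_pass (runs : List (Int × Int)) :
    ∀ (rem : Int) (acc : List (Int × Int)) (tk : Bool), pvOK runs → pvOK acc →
      pvFlat (runs.foldl pvPassStep (rem, acc, tk)).2.1 = pvFlat acc ++ pvPass rem (pvFlat runs) ∧
      pvOK (runs.foldl pvPassStep (rem, acc, tk)).2.1 ∧
      ((runs.foldl pvPassStep (rem, acc, tk)).2.2 = false →
        tk = false ∧ pvPass rem (pvFlat runs) = pvFlat runs) := by
  induction runs with
  | nil =>
    intro rem acc tk _ hacc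
    refine ⟨by simp [pvFlat, pvPass], hacc, fun h => ⟨h, by simp [pvFlat, pvPass]⟩⟩
  | cons p rest ih =>
    intro rem acc tk hok hacc
    obtain ⟨v, k⟩ := p
    have hk : 1 ≤ k := hok (v, k) (by simp)
    have hrest : pvOK rest := fun q hq => hok q (by simp [hq])
    rw [List.foldl_cons]
    by_cases hfit : v ≤ rem
    · simp only [pvPassStep, if_pos hfit]
      set t : Int := if 0 < v then min k (PySem.Int.floordiv rem v) else k with htdef
      have hkcast : ((k.toNat : Int)) = k := by omega
      have ht_le : t ≤ k ∧ 0 ≤ t := by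
        by_cases hv : 0 < v
        · have hd1 : 1 ≤ PySem.Int.floordiv rem v := by
            rw [PySem.Int.le_floordiv_iff_mul_le hv]; omega
          simp only [htdef, if_pos hv]; omega
        · simp only [htdef, if_neg hv]; omega
      have hpass : pvPass rem (pvFlat ((v, k) :: rest)) =
          List.replicate (k - t).toNat v ++ pvPass (rem - t * v) (pvFlat rest) := by
        rw [pvFlat_cons]
        by_cases hv : 0 < v
        · have := pvPass_rep_pos v hv k.toNat rem hfit (pvFlat rest)
          rw [hkcast] at this
          rw [this]
          simp only [htdef, if_pos hv]
          congr 1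
          congr 1
          omega
        · have hvle : v ≤ 0 := by omega
          have := pvPass_rep_nonpos v hvle k.toNat rem hfit (pvFlat rest)
          rw [hkcast] at this
          rw [this]
          simp only [htdef, if_neg hv]
          simp
      set acc' := if k - t ≠ 0 then acc ++ [(v, k - t)] else acc with hacc'
      have hacc'ok : pvOK acc' := by
        by_cases hz : k - t ≠ 0
        · simp only [hacc', if_pos hz]
          intro q hq
          rcases List.mem_append.mp hq with h1 | h2
          · exact hacc q h1
          · simp at h2; subst h2; simp; omega
        · simp only [hacc', if_neg hz]; exact hacc
      have hflatacc' : pvFlat acc' = pvFlat acc ++ List.replicate (k - t).toNat v := by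
        by_cases hz : k - t ≠ 0
        · simp only [hacc', if_pos hz, pvFlat_append]
          simp [pvFlat]
        · simp only [hacc', if_neg hz]
          have : (k - t).toNat = 0 := by omega
          simp [this]
      obtain ⟨h1, h2, h3⟩ := ih (rem - t * v) acc' true hrest hacc'ok
      refine ⟨?_, h2, ?_⟩
      · rw [h1, hflatacc', hpass, List.append_assoc]
      · intro hb
        exact absurd (h3 hb).1 (by simp)
    · simp only [pvPassStep, if_neg hfit]
      have hacc2 : pvOK (acc ++ [(v, k)]) := by
        intro q hq
        rcases List.mem_append.mp hq with h1 | h2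
        · exact hacc q h1
        · simp at h2; subst h2; simpa
      obtain ⟨h1, h2, h3⟩ := ih rem (acc ++ [(v, k)]) tk hrest hacc2
      have hpass : pvPass rem (pvFlat ((v, k) :: rest)) =
          List.replicate k.toNat v ++ pvPass rem (pvFlat rest) := by
        rw [pvFlat_cons]; exact pvPass_rep_skip rem v hfit k.toNat (pvFlat rest)
      refine ⟨?_, h2, ?_⟩
      · rw [h1, pvFlat_append, hpass]
        simp [pvFlat, List.append_assoc]
      · intro hb
        obtain ⟨htk, hfix⟩ := h3 hb
        exact ⟨htk, by rw [hpass, hfix, pvFlat_cons]⟩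

-- a pass fixpoint stays fixed under iteration
theorem pvPass_iter_fix (cap : Int) (l : List Int) (h : pvPass cap l = l) (n : Nat) :
    (pvPass cap)^[n] l = l := by
  induction n with
  | zero => rfl
  | succ m ih => rw [Function.iterate_succ_apply, h, ih]

-- the (value * count) sum of runs is the sum of the flattening
theorem pvSumRuns (runs : List (Int × Int)) (hok : pvOK runs) :
    (runs.map (fun p => p.1 * p.2)).sum = (pvFlat runs).sum := by
  induction runs with
  | nil => rfl
  | cons p rest ih =>
    have hk : 1 ≤ p.2 := hok p (by simp)
    have hrest : pvOK rest := fun q hq => hok q (by simp [hq])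
    rw [List.map_cons, List.sum_cons, pvFlat_cons, List.sum_append, ih hrest]
    congr 1
    rw [List.sum_replicate, nsmul_eq_mul]
    rw [mul_comm]
    congr 1
    omega

-- B's lane loop computes the iterated functional pass
theorem pvLanesB_eq (cap : Int) : ∀ (n : Nat) (lanes : Int) (runs : List (Int × Int)),
    lanes.toNat = n → pvOK runs →
    ((pvLanesB cap runs lanes).map (fun p => p.1 * p.2)).sum =
      ((pvPass cap)^[n] (pvFlat runs)).sum := by
  intro n
  induction n with
  | zero =>
    intro lanes runs hl hok
    rw [pvLanesB, if_neg (by omega)]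
    exact pvSumRuns runs hok
  | succ m ih =>
    intro lanes runs hl hok
    rw [pvLanesB, if_pos (by omega)]
    obtain ⟨h1, h2, h3⟩ := pvFoldl_pass runs cap [] false hok (by intro q hq; simp at hq)
    rw [pvFlat_nil, List.nil_append] at h1
    by_cases hb : (runs.foldl pvPassStep (cap, [], false)).2.2
    · rw [if_pos hb]
      rw [ih (lanes - 1) _ (by omega) h2, h1]
      rw [Function.iterate_succ_apply]
    · rw [if_neg hb]
      obtain ⟨_, hfix⟩ := h3 (by simpa using hb)
      rw [pvPass_iter_fix cap (pvFlat runs) hfix, pvSumRuns runs hok]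

-- characterise the _rle inner counter
theorem pvRleCnt_eq (xs : List Int) (v : Int) (k : Nat) (hk : k ≤ xs.length) :
    pvRleCnt xs v k = k + ((xs.drop k).takeWhile (fun c => c = v)).length := by
  fun_induction pvRleCnt with
  | case1 k h heq ih =>
    rw [ih (by omega)]
    rw [List.drop_eq_getElem_cons h]
    rw [List.takeWhile_cons]
    simp only [heq, decide_true, if_true, List.length_cons]
    omega
  | case2 k h heq =>
    rw [List.drop_eq_getElem_cons h, List.takeWhile_cons]
    simp [heq]
  | case3 k h =>
    have : k = xs.length := by omega
    subst this
    simp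

-- dropWhile is drop of the takeWhile length
theorem pvDropWhile_eq_drop {α : Type} (p : α → Bool) (l : List α) :
    l.dropWhile p = l.drop (l.takeWhile p).length := by
  induction l with
  | nil => rfl
  | cons x xs ih =>
    by_cases h : p x
    · rw [List.dropWhile_cons_of_pos h, List.takeWhile_cons_of_pos h]
      simp [ih]
    · rw [List.dropWhile_cons_of_neg h, List.takeWhile_cons_of_neg h]
      simp

-- the outer _rle loop appends the run-length encoding of the suffix from i
theorem pvRleLoop_spec (xs : List Int) (i : Nat) (runs : List (Int × Int)) :
    pvOK runs →
      pvFlat (pvRleLoop xs i runs) = pvFlat runs ++ xs.drop i ∧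
      pvOK (pvRleLoop xs i runs) := by
  fun_induction pvRleLoop with
  | case1 i runs h ih =>
    intro hok
    have hk1 : i + 1 ≤ pvRleCnt xs xs[i] (i + 1) := pvRleCnt_ge xs xs[i] (i + 1)
    have hkeq : pvRleCnt xs xs[i] (i + 1) =
        (i + 1) + ((xs.drop (i + 1)).takeWhile (fun c => c = xs[i])).length :=
      pvRleCnt_eq xs xs[i] (i + 1) (by omega)
    set v := xs[i] with hv
    set k := pvRleCnt xs v (i + 1) with hkd
    set T := (xs.drop (i + 1)).takeWhile (fun c => c = v) with hT
    have hok2 : pvOK (runs ++ [(v, ((k : Int) - (i : Int)))]) := by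
      intro q hq
      rcases List.mem_append.mp hq with h1 | h2
      · exact hok q h1
      · simp at h2; subst h2; simp; omega
    obtain ⟨ihf, ihok⟩ := ih hok2
    refine ⟨?_, ihok⟩
    rw [ihf, pvFlat_append]
    have h1 : pvFlat [(v, ((k : Int) - (i : Int)))] = List.replicate (T.length + 1) v := by
      simp only [pvFlat, List.flatMap_cons, List.flatMap_nil, List.append_nil]
      congr 1
      omega
    have h2 : List.replicate (T.length + 1) v = v :: T := by
      rw [List.replicate_succ]
      congr 1
      exact (List.eq_replicate_of_mem
        (fun b hb => by simpa using (List.mem_takeWhile_imp hb))).symm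
    have h3 : xs.drop k = (xs.drop (i + 1)).drop T.length := by
      rw [List.drop_drop, hkeq]
    have h4 : (xs.drop (i + 1)).drop T.length = (xs.drop (i + 1)).dropWhile (fun c => c = v) :=
      (pvDropWhile_eq_drop _ _).symm
    have h5 : xs.drop i = v :: xs.drop (i + 1) := List.drop_eq_getElem_cons h
    rw [h1, h2, h3, h4, h5, List.append_assoc]
    congr 1
    simp only [List.cons_append]
    congr 1
    exact List.takeWhile_append_dropWhile
  | case2 i runs h =>
    intro hok
    rw [List.drop_of_length_le (by omega)]
    exact ⟨(List.append_nil _).symm, hok⟩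

-- the run-length encoding flattens back to the list, with positive counts
theorem pvRle_spec (xs : List Int) : pvFlat (pvRle xs) = xs ∧ pvOK (pvRle xs) := by
  unfold pvRle
  have := pvRleLoop_spec xs 0 [] (by intro q hq; simp at hq)
  simpa [pvFlat] using this

-- ===== VERDICT (by name: the statement is the Claim_ definition above) =====
theorem greedy_lane_overflow_spec : Claim_equal_greedy_lane_overflow := by
  intro no_lanes capacity cars _
  unfold Spec_greedy_lane_overflow greedy_lane_overflow greedy_lane_overflow_alt
  set D := PySem.List.sorted cars (fun x => x) true with hD
  have hA : (fun (cl : List Int) (_ : Int) => pvLaneWhileA capacity 0 cl 0) =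
      fun cl _ => pvPass capacity cl := by
    funext cl i
    rw [pvLaneWhileA_eq]
    simp
  rw [hA]
  dsimp only
  rw [pvFoldl_const (pvPass capacity) (PySem.List.pyRange 0 no_lanes 1) D]
  obtain ⟨hflat, hok⟩ := pvRle_spec D
  rw [pvLanesB_eq capacity no_lanes.toNat no_lanes (pvRle D) rfl hok, hflat]
  congr 2
  rw [PySem.List.length_pyRange_one]
  omega
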